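-- pv_equiv track=rewrite | github.com/JohnnyFes/algorithms-templates | kontest/23758/stack_max.py | stack_max
-- ===== SOURCE A (Python) =====
-- from typing import List, Tuple
--
-- class Stack:
--     def __init__(self):
--         self.items = []
--
--     def push(self, item):
--         self.items.append(item)
--
--     def pop(self):
--         return self.items.pop()
--
--     def peek(self):
--         return self.items[-1]
--
--     def size(self):
--         return len(self.items)
--
--     def get_max(self):
--         if self.size() > 0:
--             return max(self.items)
--         return None
--
-- def stack_max(count, commands) -> List[str]:
--     stack = Stack()
--     result = []
--     for item in commands:
--         item = item.rstrip()
--         if item == 'get_max':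
--             result += str(stack.get_max()) + '\n'
--             continue
--         if item == 'pop':
--             if stack.size() > 0:
--                 stack.pop()
--             else:
--                 result += 'error\n'
--             continue
--         pushco = item.split(' ')
--         if pushco[0] == 'push':
--             stack.push(int(pushco[1]))
--     return result
-- ===== SOURCE B (Python) =====
-- def stack_max(count, commands) -> list:
--     # Max-stack: each entry carries (value, running maximum); get_max reads the top entry.
--     stack = []
--     pieces = []
--     for raw in commands:
--         cmd = raw.rstrip()
--         if cmd == 'get_max':
--             pieces.append(str(stack[-1][1]) if stack else 'None')
--             pieces.append('\n')
--         elif cmd == 'pop':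
--             if stack:
--                 stack.pop()
--             else:
--                 pieces.append('error')
--                 pieces.append('\n')
--         else:
--             parts = cmd.split(' ')
--             if parts[0] == 'push':
--                 v = int(parts[1])
--                 stack.append((v, max(v, stack[-1][1]) if stack else v))
--     return list(''.join(pieces))
-- ===== Notes on version B (the rewrite author's own statement) =====
-- stated objective: alternative
-- what changed: Replaces A's Stack class whose get_max scans the whole stack with max(items) by a max-stack of (value, running-maximum) pairs read off the top entry, and builds the output by joining collected pieces instead of extending the result list character by character.
import Mathlib
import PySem

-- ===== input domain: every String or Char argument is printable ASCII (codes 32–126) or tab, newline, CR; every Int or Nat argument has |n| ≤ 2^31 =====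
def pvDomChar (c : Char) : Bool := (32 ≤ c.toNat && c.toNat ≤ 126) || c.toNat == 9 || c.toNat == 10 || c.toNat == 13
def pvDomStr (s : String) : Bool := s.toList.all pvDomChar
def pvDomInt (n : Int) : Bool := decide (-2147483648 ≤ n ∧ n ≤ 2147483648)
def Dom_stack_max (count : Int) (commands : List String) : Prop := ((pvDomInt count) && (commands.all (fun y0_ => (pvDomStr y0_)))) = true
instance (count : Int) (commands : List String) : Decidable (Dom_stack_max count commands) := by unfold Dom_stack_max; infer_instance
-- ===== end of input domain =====

-- B replaces A's scan-the-whole-stack get_max by a max-stack whose entries carry the running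
-- maximum; both return the list of single characters A's `result += str` builds.

-- ===== PORT A =====
-- The Python stack (append/pop/peek at the END) is represented top-at-head (push = cons,
-- pop = tail); only the stack's multiset of values feeds the output (max and str of it), so
-- every computed value is the same.  `result += string` extends the list with one-char strings.
-- split(' ') has a nonempty separator, so PySem.Str.split? is exact (some) here; on commands
-- where Python raises ('push' with a missing or non-int second token) Pre_ excludes the input
-- and the port skips.
def stackMaxLoop : List String → List Int → List String → List String
  | [], _, res => res
  | cmd :: rest, items, res =>
    if PySem.Str.rstrip cmd = "get_max" then
      stackMaxLoop rest items
        (res ++ (((match PySem.List.max? items (fun y => y) with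
                    | some v => PySem.Int.toStr v
                    | none => "None") : String).toList ++ ['\n']).map (fun c => String.ofList [c]))
    else if PySem.Str.rstrip cmd = "pop" then
      match items with
      | [] => stackMaxLoop rest items (res ++ "error\n".toList.map (fun c => String.ofList [c]))
      | _ :: t => stackMaxLoop rest t res
    else
      if ((PySem.Str.split? (PySem.Str.rstrip cmd) " ").getD []).getD 0 "" = "push" then
        match ((PySem.Str.split? (PySem.Str.rstrip cmd) " ").getD [])[1]? >>= PySem.Int.ofStr? with
        | some v => stackMaxLoop rest (v :: items) res
        | none => stackMaxLoop rest items res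
      else stackMaxLoop rest items res

def stack_max (count : Int) (commands : List String) : List String :=
  stackMaxLoop commands [] []

-- ===== PORT B =====
-- Max-stack (top-at-head as above): each entry is (value, running maximum of the stack up to
-- it); get_max reads the top entry without scanning.  Pieces are collected, ''.join(...)-ed, and list(...) of
-- the joined string gives the one-char strings.
def stackMaxAltLoop : List String → List (Int × Int) → List String → List String
  | [], _, out => out
  | raw :: rest, stack, out =>
    if PySem.Str.rstrip raw = "get_max" then
      stackMaxAltLoop rest stack
        (out ++ [(match stack with | (_, m) :: _ => PySem.Int.toStr m | [] => "None"), "\n"])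
    else if PySem.Str.rstrip raw = "pop" then
      match stack with
      | [] => stackMaxAltLoop rest stack (out ++ ["error", "\n"])
      | _ :: t => stackMaxAltLoop rest t out
    else
      if ((PySem.Str.split? (PySem.Str.rstrip raw) " ").getD []).getD 0 "" = "push" then
        match ((PySem.Str.split? (PySem.Str.rstrip raw) " ").getD [])[1]? >>= PySem.Int.ofStr? with
        | some v =>
          stackMaxAltLoop rest
            ((v, match stack with | (_, pm) :: _ => max v pm | [] => v) :: stack) out
        | none => stackMaxAltLoop rest stack out
      else stackMaxAltLoop rest stack out

def stack_max_alt (count : Int) (commands : List String) : List String :=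
  (PySem.Str.join "" (stackMaxAltLoop commands [] [])).toList.map (fun c => String.ofList [c])

-- ===== PRECONDITION & SPEC =====
-- Pre_ excludes exactly the commands on which A raises: a command whose first space-separated
-- token (after rstrip) is 'push' but which has no second token (IndexError) or whose second
-- token is not int()-parseable (ValueError).
def pvCmdOk (cmd : String) : Bool :=
  let s := PySem.Str.rstrip cmd
  let parts := (PySem.Str.split? s " ").getD []
  s == "get_max" || s == "pop" || parts.getD 0 "" != "push" ||
    (parts[1]? >>= PySem.Int.ofStr?).isSome

def Pre_stack_max (count : Int) (commands : List String) : Prop :=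
  commands.all pvCmdOk = true
instance (count : Int) (commands : List String) : Decidable (Pre_stack_max count commands) := by
  unfold Pre_stack_max; infer_instance

def pvWitness_stack_max : Int × List String :=
  (3, ["push 2", "push 7 ", "get_max", "pop", "get_max", "pop", "pop", "get_max"])

def Spec_stack_max (count : Int) (commands : List String) (out : List String) : Prop := out = stack_max_alt count commands
instance (count : Int) (commands : List String) (out : List String) : Decidable (Spec_stack_max count commands out) := by unfold Spec_stack_max; infer_instance

-- ===== CLAIM (what is proved, stated in full; the proofs are below) =====
def Claim_equal_stack_max : Prop := ∀ (count : Int) (commands : List String), Dom_stack_max count commands → Pre_stack_max count commands → Spec_stack_max count commands (stack_max count commands)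

-- ===== LEMMAS AND PROOFS =====

-- a max-stack is well-annotated: each entry's second component is the max of the values from it down
def pvAnn : List (Int × Int) → Prop
  | [] => True
  | (v, m) :: t => m = (match t with | [] => v | (_, m') :: _ => max v m') ∧ pvAnn t

lemma pvJoinNil_flatten : ∀ ps : List (List Char), PySem.Chars.join [] ps = ps.flatten
  | [] => by simp [PySem.Chars.join_nil]
  | [p] => by simp [PySem.Chars.join_singleton]
  | p :: q :: r => by
      rw [PySem.Chars.join_cons_cons, pvJoinNil_flatten (q :: r)]; simp

-- the flattened pieces rendered as one-char strings
def pvConv (out : List String) : List String :=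
  ((out.map String.toList).flatten).map (fun c => String.ofList [c])

lemma pvAnn_foldl : ∀ (s : List (Int × Int)) (a : Int), pvAnn s →
    (s.map Prod.fst).foldl max a = (match s with | [] => a | (_, m) :: _ => max a m)
  | [], _, _ => rfl
  | (v, m) :: t, a, h => by
      obtain ⟨hm, ht⟩ := h
      simp only [List.map_cons, List.foldl_cons]
      rw [pvAnn_foldl t (max a v) ht]
      cases t with
      | nil => simp only at hm ⊢; rw [hm]
      | cons p r =>
        obtain ⟨w, m'⟩ := p
        simp only at hm ⊢
        rw [hm, max_assoc]

lemma pvMax?_ann_cons (v m : Int) (t : List (Int × Int)) (h : pvAnn ((v, m) :: t)) :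
    PySem.List.max? (((v, m) :: t).map Prod.fst) (fun y => y) = some m := by
  obtain ⟨hm, ht⟩ := h
  simp only [List.map_cons, PySem.List.max?_id_cons]
  rw [pvAnn_foldl t v ht]
  cases t with
  | nil => simp only at hm; rw [hm]
  | cons q r => obtain ⟨w, m'⟩ := q; simp only at hm ⊢; rw [hm]

set_option maxHeartbeats 1000000 in
lemma pvLoop_eq : ∀ (cmds : List String) (stack : List (Int × Int)) (out : List String),
    pvAnn stack →
    stackMaxLoop cmds (stack.map Prod.fst) (pvConv out) = pvConv (stackMaxAltLoop cmds stack out)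
  | [], _, _, _ => rfl
  | cmd :: rest, stack, out, h => by
      simp only [stackMaxLoop, stackMaxAltLoop]
      by_cases h1 : PySem.Str.rstrip cmd = "get_max"
      · simp only [if_pos h1]
        cases stack with
        | nil =>
          have := pvLoop_eq rest [] (out ++ ["None", "\n"]) trivial
          simpa [pvConv, PySem.List.max?] using this
        | cons p t =>
          obtain ⟨v, m⟩ := p
          rw [pvMax?_ann_cons v m t h]
          have := pvLoop_eq rest ((v, m) :: t) (out ++ [PySem.Int.toStr m, "\n"]) h
          simpa [pvConv] using this
      · simp only [if_neg h1]
        by_cases h2 : PySem.Str.rstrip cmd = "pop"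
        · simp only [if_pos h2]
          cases stack with
          | nil =>
            have := pvLoop_eq rest [] (out ++ ["error", "\n"]) trivial
            simpa [pvConv] using this
          | cons p t =>
            obtain ⟨v, m⟩ := p
            exact pvLoop_eq rest t out h.2
        · simp only [if_neg h2]
          by_cases h3 : ((PySem.Str.split? (PySem.Str.rstrip cmd) " ").getD []).getD 0 "" = "push"
          · simp only [if_pos h3]
            cases hv : ((PySem.Str.split? (PySem.Str.rstrip cmd) " ").getD [])[1]? >>=
                PySem.Int.ofStr? with
            | none => exact pvLoop_eq rest stack out h
            | some v =>
              cases stack with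
              | nil =>
                have := pvLoop_eq rest [(v, v)] out ⟨rfl, trivial⟩
                simpa using this
              | cons p t =>
                obtain ⟨w, pm⟩ := p
                have := pvLoop_eq rest ((v, max v pm) :: (w, pm) :: t) out ⟨rfl, h⟩
                simpa using this
          · simp only [if_neg h3]
            exact pvLoop_eq rest stack out h

lemma pvAlt_eq_conv (count : Int) (commands : List String) :
    stack_max_alt count commands = pvConv (stackMaxAltLoop commands [] []) := by
  unfold stack_max_alt pvConv
  rw [PySem.Str.toList_join]
  rw [show ("" : String).toList = ([] : List Char) from rfl]
  rw [pvJoinNil_flatten]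

-- ===== VERDICT (by name: the statement is the Claim_ definition above) =====
theorem stack_max_spec : Claim_equal_stack_max := by
  intro count commands _ _
  unfold Spec_stack_max stack_max
  rw [pvAlt_eq_conv]
  have := pvLoop_eq commands [] [] trivial
  simpa [pvConv] using this
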